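-- pv_equiv track=rewrite | github.com/ArnauFernandez/M03-2023-24 | UF3 Gestió de Fitxers/palabras/tasca2.py | agregar_cantidad_vocales
-- ===== SOURCE A (Python) =====
-- def contar_vocales(palabra):
--     """Cuenta la cantidad de vocales en una palabra."""
--     vocales = "aeiouAEIOU"
--     return sum(1 for letra in palabra if letra in vocales)
--
-- def agregar_cantidad_vocales(lineas):
--     """Agrega la cantidad de vocales al inicio de cada línea."""
--     lineas_con_vocales = []
--     for linea in lineas:
--         # Eliminar los espacios en blanco al principio y al final de la línea
--         palabra = linea.strip()
--         # Contar la cantidad de vocales en la palabra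
--         cantidad_vocales = contar_vocales(palabra)
--         # Crear la nueva línea con el formato especificado
--         nueva_linea = f"{cantidad_vocales}\t{palabra}\n"
--         lineas_con_vocales.append(nueva_linea)
--     return lineas_con_vocales
-- ===== SOURCE B (Python) =====
-- def agregar_cantidad_vocales(lineas):
--     """Agrega la cantidad de vocales al inicio de cada línea."""
--     def formatear(linea):
--         palabra = linea.strip()
--         n = sum(palabra.count(v) for v in "aeiouAEIOU")
--         return f"{n}\t{palabra}\n"
--     return [formatear(linea) for linea in lineas]
-- ===== Notes on version B (the rewrite author's own statement) =====
-- stated objective: idiomatic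
-- what changed: Replaces the accumulator loop with a list comprehension over a local formatter, and counts vowels by scanning the word once per vowel with str.count over the fixed alphabet 'aeiouAEIOU' instead of testing each character against the vowel string.
import Mathlib
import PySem

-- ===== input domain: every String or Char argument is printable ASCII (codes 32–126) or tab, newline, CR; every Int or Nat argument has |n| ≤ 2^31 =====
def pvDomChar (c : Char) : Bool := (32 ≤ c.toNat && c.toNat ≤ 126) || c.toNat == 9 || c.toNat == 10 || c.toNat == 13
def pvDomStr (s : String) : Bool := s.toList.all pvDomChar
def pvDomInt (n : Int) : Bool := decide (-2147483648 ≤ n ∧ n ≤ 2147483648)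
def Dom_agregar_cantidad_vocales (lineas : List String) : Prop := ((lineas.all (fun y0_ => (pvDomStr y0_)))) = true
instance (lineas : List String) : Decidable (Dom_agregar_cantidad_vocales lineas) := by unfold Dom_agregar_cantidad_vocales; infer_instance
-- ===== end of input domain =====

-- B replaces the accumulator loop by a comprehension over a formatter helper and counts
-- vowels per-vowel with str.count over "aeiouAEIOU" instead of per-character membership.

-- ===== PORT A =====
def contar_vocales (palabra : String) : Int :=
  palabra.toList.foldl
    (fun acc letra => if PySem.Chars.isIn [letra] "aeiouAEIOU".toList then acc + 1 else acc) 0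

def agregar_cantidad_vocales (lineas : List String) : List String :=
  lineas.foldl
    (fun lineas_con_vocales linea =>
      let palabra := PySem.Str.strip linea
      let cantidad_vocales := contar_vocales palabra
      let nueva_linea :=
        String.mk (PySem.Int.toChars cantidad_vocales ++ '\t' :: palabra.toList ++ ['\n'])
      lineas_con_vocales ++ [nueva_linea]) []

-- ===== PORT B =====
def formatear (linea : String) : String :=
  let palabra := PySem.Str.strip linea
  let n := "aeiouAEIOU".toList.foldl
    (fun acc v => acc + (PySem.Chars.count palabra.toList [v] : Int)) 0
  String.mk (PySem.Int.toChars n ++ '\t' :: palabra.toList ++ ['\n'])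

def agregar_cantidad_vocales_alt (lineas : List String) : List String :=
  lineas.map formatear

-- ===== PRECONDITION & SPEC =====
def Spec_agregar_cantidad_vocales (lineas : List String) (out : List String) : Prop := out = agregar_cantidad_vocales_alt lineas
instance (lineas : List String) (out : List String) : Decidable (Spec_agregar_cantidad_vocales lineas out) := by unfold Spec_agregar_cantidad_vocales; infer_instance

-- ===== CLAIM (what is proved, stated in full; the proofs are below) =====
def Claim_equal_agregar_cantidad_vocales : Prop := ∀ (lineas : List String), Dom_agregar_cantidad_vocales lineas → Spec_agregar_cantidad_vocales lineas (agregar_cantidad_vocales lineas)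

-- ===== LEMMAS AND PROOFS =====

lemma count_go_single (v : Char) : ∀ (l : List Char) (fuel acc : Nat), l.length ≤ fuel →
    PySem.Chars.count.go [v] fuel l acc = acc + l.count v := by
  intro l
  induction l with
  | nil => intro fuel acc _; cases fuel <;> simp [PySem.Chars.count.go]
  | cons h t ih =>
      intro fuel acc hle
      cases fuel with
      | zero => simp at hle
      | succ f =>
          simp only [List.length_cons, Nat.succ_le_succ_iff] at hle
          by_cases hv : h = v
          · subst hv
            simp [PySem.Chars.count.go, List.isPrefixOf, ih f (acc + 1) hle,
              List.count_cons]
            omega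
          · simp [PySem.Chars.count.go, List.isPrefixOf, hv,
              ih f acc hle, List.count_cons, Ne.symm hv]

lemma chars_count_single (l : List Char) (v : Char) :
    PySem.Chars.count l [v] = l.count v := by
  simp [PySem.Chars.count, count_go_single v l l.length 0 le_rfl]

lemma countP_or_disjoint {α : Type} (p q : α → Bool) (l : List α)
    (h : ∀ x, ¬ (p x = true ∧ q x = true)) :
    l.countP (fun x => p x || q x) = l.countP p + l.countP q := by
  induction l with
  | nil => simp
  | cons a t ih =>
      by_cases hp : p a = true
      · have hq : ¬ q a = true := fun hq => h a ⟨hp, hq⟩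
        simp [List.countP_cons, hp, hq, ih]
        omega
      · simp [List.countP_cons, hp, ih]
        by_cases hq : q a = true <;> simp [hq] <;> omega

lemma sum_counts_eq_countP (vs : List Char) (hvs : vs.Nodup) (p : List Char) :
    ∀ (a : Int), vs.foldl (fun acc v => acc + (p.count v : Int)) a
      = a + (p.countP (fun c => vs.contains c) : Int) := by
  induction vs with
  | nil => intro a; simp
  | cons v vs ih =>
      intro a
      have hnd := (List.nodup_cons.mp hvs)
      have key : p.countP (fun c => c == v || vs.contains c)
          = p.count v + p.countP (fun c => vs.contains c) := by
        have := countP_or_disjoint (fun c => c == v) (fun c => vs.contains c) p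
          (by intro x ⟨h1, h2⟩
              exact hnd.1 (by simpa using (beq_iff_eq.mp h1) ▸ (List.contains_iff_mem.mp h2)))
        simpa [List.count] using this
      simp only [List.foldl_cons]
      rw [ih hnd.2 (a + (p.count v : Int))]
      simp only [List.contains_cons]
      rw [key]
      push_cast
      ring

lemma isIn_single (c : Char) (vs : List Char) :
    PySem.Chars.isIn [c] vs = vs.contains c := by
  by_cases h : c ∈ vs
  · rw [(PySem.Chars.isIn_iff_infix [c] vs).mpr ((List.singleton_infix_iff c vs).mpr h)]
    simp [h]
  · have hne : PySem.Chars.isIn [c] vs = false := by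
      rcases Bool.eq_false_or_eq_true (PySem.Chars.isIn [c] vs) with hb | hb
      · exact absurd ((List.singleton_infix_iff c vs).mp
          ((PySem.Chars.isIn_iff_infix [c] vs).mp hb)) h
      · exact hb
    simp [hne, h]

lemma counts_agree (w : String) :
    contar_vocales w
      = "aeiouAEIOU".toList.foldl (fun acc v => acc + (w.toList.count v : Int)) 0 := by
  unfold contar_vocales
  rw [PySem.List.foldl_if_add_one (fun letra => PySem.Chars.isIn [letra] "aeiouAEIOU".toList)]
  rw [sum_counts_eq_countP "aeiouAEIOU".toList (by decide) w.toList 0]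
  simp only [zero_add]
  congr 1
  exact_mod_cast congrArg Nat.cast
    (List.countP_congr (fun c _ => by simp [isIn_single]))

lemma line_agree (linea : String) :
    String.mk (PySem.Int.toChars (contar_vocales (PySem.Str.strip linea))
        ++ '\t' :: (PySem.Str.strip linea).toList ++ ['\n'])
      = formatear linea := by
  unfold formatear
  dsimp only
  rw [counts_agree,
    show (fun (acc : Int) (v : Char) =>
        acc + (PySem.Chars.count (PySem.Str.strip linea).toList [v] : Int))
      = (fun acc v => acc + ((PySem.Str.strip linea).toList.count v : Int))
      from funext fun acc => funext fun v => by rw [chars_count_single]]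

lemma A_foldl (lineas : List String) : ∀ (acc : List String),
    List.foldl (fun lineas_con_vocales linea =>
      let palabra := PySem.Str.strip linea
      let cantidad_vocales := contar_vocales palabra
      let nueva_linea :=
        String.mk (PySem.Int.toChars cantidad_vocales ++ '\t' :: palabra.toList ++ ['\n'])
      lineas_con_vocales ++ [nueva_linea]) acc lineas = acc ++ lineas.map formatear := by
  induction lineas with
  | nil => intro acc; simp
  | cons l t ih =>
      intro acc
      simp only [List.foldl_cons, List.map_cons]
      rw [ih, ← line_agree l]
      simp

-- ===== VERDICT (by name: the statement is the Claim_ definition above) =====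
theorem agregar_cantidad_vocales_spec : Claim_equal_agregar_cantidad_vocales := by
  intro lineas _
  unfold Spec_agregar_cantidad_vocales agregar_cantidad_vocales agregar_cantidad_vocales_alt
  rw [A_foldl lineas []]
  simp
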